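-- pv_equiv track=rewrite | github.com/tyler-utah/AlloyForwardProgress | artifact/cadp/scripts/CADPGen.py | RecursiveAddClauses
-- ===== SOURCE A (Python) =====
-- def RecursiveAddClauses(index, condition, nThreads, myList):
--     if (index == nThreads):
--         if len(myList) == 0:
--             return condition
--
--         setStr = "{"
--         for i in range(len(myList) - 1):
--             setStr += str(myList[i]) + ", "
--         setStr += str(myList[len(myList)-1]) + "}"
--
--         toAppend = "( < "
--         for i in range(len(myList) - 1):
--             toAppend += " \'EX !" + str(myList[i]) + " .* !" + setStr + "\' . true* ."
--         toAppend += " \'EX !" + str(myList[len(myList)-1]) + " .* !" + setStr + "\' . true* > @ )"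
--
--         if len(myList) == nThreads:
--             toAppend = toAppend + ");"
--         else:
--             toAppend = toAppend + " or "
--
--         return condition + toAppend
--     else:
--         condition = RecursiveAddClauses(index+1, condition, nThreads, myList)
--         myList.append(index)
--         condition = RecursiveAddClauses(index+1, condition, nThreads, myList)
--         myList.pop()
--         return condition
-- ===== SOURCE B (Python) =====
-- def RecursiveAddClauses(index, condition, nThreads, myList):
--     # Iterative bitmask enumeration of all subsets of the free indices
--     # [index, nThreads), in A's exclude-first order; never mutates myList.
--     k = nThreads - index
--     out = condition
--     for count in range(2 ** k):
--         full = myList + [index + j for j in range(k) if (count >> (k - 1 - j)) & 1 == 1]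
--         if len(full) == 0:
--             continue
--         setStr = "{"
--         for x in full[:-1]:
--             setStr += str(x) + ", "
--         setStr += str(full[-1]) + "}"
--         toAppend = "( < "
--         for x in full[:-1]:
--             toAppend += " \'EX !" + str(x) + " .* !" + setStr + "\' . true* ."
--         toAppend += " \'EX !" + str(full[-1]) + " .* !" + setStr + "\' . true* > @ )"
--         toAppend += ");" if len(full) == nThreads else " or "
--         out += toAppend
--     return out
-- ===== Notes on version B (the rewrite author's own statement) =====
-- stated objective: alternative
-- what changed: Replaces A's mutating recursive backtracking over include/exclude decisions with an iterative bitmask enumeration: each count in range(2**(nThreads-index)) is decoded into the included free indices (MSB = smallest index, giving A's exclude-first order), and clauses are accumulated in one flat loop without touching myList.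
import Mathlib
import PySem

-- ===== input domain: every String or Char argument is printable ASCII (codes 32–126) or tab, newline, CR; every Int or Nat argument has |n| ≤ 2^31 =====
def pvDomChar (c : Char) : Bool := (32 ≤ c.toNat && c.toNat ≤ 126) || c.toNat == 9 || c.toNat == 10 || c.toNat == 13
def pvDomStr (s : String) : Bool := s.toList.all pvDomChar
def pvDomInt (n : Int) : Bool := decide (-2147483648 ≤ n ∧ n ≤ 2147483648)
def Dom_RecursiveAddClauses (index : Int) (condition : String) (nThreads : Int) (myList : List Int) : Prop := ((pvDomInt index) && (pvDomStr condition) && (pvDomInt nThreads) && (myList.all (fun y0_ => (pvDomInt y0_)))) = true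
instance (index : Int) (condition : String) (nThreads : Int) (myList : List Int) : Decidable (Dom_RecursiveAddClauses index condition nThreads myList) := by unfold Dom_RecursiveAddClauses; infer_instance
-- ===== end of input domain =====

-- B replaces A's recursive backtracking with an iterative bitmask enumeration of the subsets;
-- equivalence is about the return value (A appends/pops on myList but restores it, B never mutates it).

-- ===== PORT A =====
-- body of A's 'index == nThreads' base case
def pvBaseA (condition : String) (nThreads : Int) (myList : List Int) : String :=
  if myList.length == 0 then condition
  else
    let setStr := (List.range (myList.length - 1)).foldl
      (fun s i => s ++ PySem.Int.toStr (myList.getD i 0) ++ ", ") "{"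
    let setStr := setStr ++ PySem.Int.toStr (myList.getD (myList.length - 1) 0) ++ "}"
    let toAppend := (List.range (myList.length - 1)).foldl
      (fun s i => s ++ " 'EX !" ++ PySem.Int.toStr (myList.getD i 0) ++ " .* !" ++ setStr ++ "' . true* .") "( < "
    let toAppend := toAppend ++ " 'EX !" ++ PySem.Int.toStr (myList.getD (myList.length - 1) 0) ++ " .* !" ++ setStr ++ "' . true* > @ )"
    let toAppend := if (myList.length : Int) == nThreads then toAppend ++ ");" else toAppend ++ " or "
    condition ++ toAppend

-- A's recursion, run with fuel = nThreads - index; exact whenever index ≤ nThreads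
-- (for index > nThreads the Python recurses past nThreads forever, excluded by Pre_)
def pvGoA (fuel : Nat) (index : Int) (condition : String) (nThreads : Int) (myList : List Int) : String :=
  if index == nThreads then pvBaseA condition nThreads myList
  else
    match fuel with
    | 0 => condition
    | f + 1 =>
      let c1 := pvGoA f (index + 1) condition nThreads myList
      pvGoA f (index + 1) c1 nThreads (myList ++ [index])

def RecursiveAddClauses (index : Int) (condition : String) (nThreads : Int) (myList : List Int) : String :=
  pvGoA (nThreads - index).toNat index condition nThreads myList

-- ===== PORT B =====
-- decode count into the included free indices: bit (k-1-j) set ⇒ index+j is included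
def pvDecode (index : Int) (k count : Nat) : List Int :=
  ((List.range k).filter (fun j => (count >>> (k - 1 - j)) &&& 1 == 1)).map (fun (j : Nat) => index + (j : Int))

-- Source B's loop body for one full list (setStr, toAppend, suffix)
def pvClause (nThreads : Int) (full : List Int) : String :=
  let setStr := full.dropLast.foldl (fun s x => s ++ PySem.Int.toStr x ++ ", ") "{"
  let setStr := setStr ++ PySem.Int.toStr (full.getLastD 0) ++ "}"
  let toAppend := full.dropLast.foldl
    (fun s x => s ++ " 'EX !" ++ PySem.Int.toStr x ++ " .* !" ++ setStr ++ "' . true* .") "( < "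
  let toAppend := toAppend ++ " 'EX !" ++ PySem.Int.toStr (full.getLastD 0) ++ " .* !" ++ setStr ++ "' . true* > @ )"
  toAppend ++ (if (full.length : Int) == nThreads then ");" else " or ")

def pvRunB (index nThreads : Int) (myList : List Int) (k : Nat) (condition : String) : String :=
  (List.range (2 ^ k)).foldl (fun acc count =>
    let full := myList ++ pvDecode index k count
    if full.length == 0 then acc else acc ++ pvClause nThreads full) condition

def RecursiveAddClauses_alt (index : Int) (condition : String) (nThreads : Int) (myList : List Int) : String :=
  pvRunB index nThreads myList (nThreads - index).toNat condition

-- ===== PRECONDITION & SPEC =====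
-- Pre_ excludes only index > nThreads, where the recursion of the Python A never reaches
-- its base case and raises RecursionError (A returns no value there).
def Pre_RecursiveAddClauses (index : Int) (condition : String) (nThreads : Int) (myList : List Int) : Prop :=
  index ≤ nThreads
instance (index : Int) (condition : String) (nThreads : Int) (myList : List Int) : Decidable (Pre_RecursiveAddClauses index condition nThreads myList) := by unfold Pre_RecursiveAddClauses; infer_instance

def pvWitness_RecursiveAddClauses : Int × String × Int × List Int := (0, "", 2, [])

def Spec_RecursiveAddClauses (index : Int) (condition : String) (nThreads : Int) (myList : List Int) (out : String) : Prop := out = RecursiveAddClauses_alt index condition nThreads myList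
instance (index : Int) (condition : String) (nThreads : Int) (myList : List Int) (out : String) : Decidable (Spec_RecursiveAddClauses index condition nThreads myList out) := by unfold Spec_RecursiveAddClauses; infer_instance

-- ===== CLAIM (what is proved, stated in full; the proofs are below) =====
def Claim_equal_RecursiveAddClauses : Prop := ∀ (index : Int) (condition : String) (nThreads : Int) (myList : List Int), Dom_RecursiveAddClauses index condition nThreads myList → Pre_RecursiveAddClauses index condition nThreads myList → Spec_RecursiveAddClauses index condition nThreads myList (RecursiveAddClauses index condition nThreads myList)

-- ===== LEMMAS AND PROOFS =====

theorem pv_foldl_range_getD {α β : Type} (l : List α) (d : α) (f : β → α → β) (init : β) :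
    (List.range l.length).foldl (fun s i => f s (l.getD i d)) init = l.foldl f init := by
  induction l generalizing init with
  | nil => simp
  | cons a t ih =>
    simp only [List.length_cons, List.range_succ_eq_map, List.foldl_cons, List.foldl_map,
      List.getD_cons_zero, List.getD_cons_succ]
    exact ih (f init a)

theorem pv_foldl_range_pred {α β : Type} (l : List α) (d : α) (f : β → α → β) (init : β) :
    (List.range (l.length - 1)).foldl (fun s i => f s (l.getD i d)) init
      = l.dropLast.foldl f init := by
  have h2 : ∀ acc : β, ∀ i ∈ List.range (l.length - 1),
      f acc (l.getD i d) = f acc (l.dropLast.getD i d) := by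
    intro acc i hi
    have hi' : i < l.length - 1 := List.mem_range.mp hi
    have hd : i < l.dropLast.length := by rw [List.length_dropLast]; exact hi'
    have hl : i < l.length := by omega
    rw [List.getD_eq_getElem l d hl, List.getD_eq_getElem _ d hd, List.getElem_dropLast]
  calc (List.range (l.length - 1)).foldl (fun s i => f s (l.getD i d)) init
      = (List.range l.dropLast.length).foldl (fun s i => f s (l.dropLast.getD i d)) init := by
        rw [List.length_dropLast]
        exact PySem.List.foldl_congr_mem _ _ _ _ h2
    _ = l.dropLast.foldl f init := pv_foldl_range_getD l.dropLast d f init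

theorem pv_fold1 (l : List Int) (init : String) :
    (List.range (l.length - 1)).foldl (fun s i => s ++ PySem.Int.toStr (l.getD i 0) ++ ", ") init
      = l.dropLast.foldl (fun s x => s ++ PySem.Int.toStr x ++ ", ") init :=
  pv_foldl_range_pred l 0 (fun s x => s ++ PySem.Int.toStr x ++ ", ") init

theorem pv_fold2 (l : List Int) (setStr init : String) :
    (List.range (l.length - 1)).foldl
        (fun s i => s ++ " 'EX !" ++ PySem.Int.toStr (l.getD i 0) ++ " .* !" ++ setStr ++ "' . true* .") init
      = l.dropLast.foldl (fun s x => s ++ " 'EX !" ++ PySem.Int.toStr x ++ " .* !" ++ setStr ++ "' . true* .") init :=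
  pv_foldl_range_pred l 0 (fun s x => s ++ " 'EX !" ++ PySem.Int.toStr x ++ " .* !" ++ setStr ++ "' . true* .") init

theorem pv_getD_last {α : Type} (l : List α) (d : α) (h : l ≠ []) :
    l.getD (l.length - 1) d = l.getLastD d := by
  have hlt : l.length - 1 < l.length := by
    cases l with | nil => simp at h | cons a t => simp
  rw [List.getD_eq_getElem l d hlt, List.getLastD_eq_getLast?,
    List.getLast?_eq_getElem?, List.getElem?_eq_getElem hlt]
  rfl

theorem pv_base_eq (condition : String) (nThreads : Int) (l : List Int) :
    pvBaseA condition nThreads l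
      = if l.length == 0 then condition else condition ++ pvClause nThreads l := by
  by_cases h : l = []
  · subst h; simp [pvBaseA]
  · have hne : (l.length == 0) = false := by simp [h]
    simp only [pvBaseA, pvClause, hne, Bool.false_eq_true, if_false]
    rw [pv_fold1, pv_getD_last l 0 h, pv_fold2]
    split <;> simp [String.append_assoc]


theorem pv_bit_top (c k : Nat) (h : c < 2 ^ k) : ((2 ^ k + c) >>> k) &&& 1 = 1 := by
  rw [Nat.shiftRight_eq_div_pow]
  have h1 : (2 ^ k + c) / 2 ^ k = 1 := by
    rw [Nat.add_comm, Nat.add_div_right _ (Nat.two_pow_pos k), Nat.div_eq_of_lt h]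
  rw [h1]
  decide

theorem pv_bit_low (c k s : Nat) (hs : s < k) :
    ((2 ^ k + c) >>> s) &&& 1 = (c >>> s) &&& 1 := by
  rw [Nat.shiftRight_eq_div_pow, Nat.shiftRight_eq_div_pow, Nat.and_one_is_mod, Nat.and_one_is_mod]
  have hk : 2 ^ k = 2 ^ s * 2 ^ (k - s) := by rw [← pow_add]; congr 1; omega
  rw [hk, Nat.mul_add_div (Nat.two_pow_pos s)]
  have h2 : 2 ^ (k - s) = 2 * 2 ^ (k - s - 1) := by rw [← pow_succ']; congr 1; omega
  rw [h2]
  omega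

theorem pv_decode_lo (index : Int) (k count : Nat) (h : count < 2 ^ k) :
    pvDecode index (k + 1) count = pvDecode (index + 1) k count := by
  unfold pvDecode
  rw [List.range_succ_eq_map]
  rw [List.filter_cons_of_neg (by
    simp only [Nat.sub_zero, Nat.add_sub_cancel]
    simp [Nat.and_one_is_mod, Nat.shiftRight_eq_div_pow, Nat.div_eq_of_lt h]), List.filter_map, List.map_map]
  have hf : ∀ j ∈ List.range k,
      ((fun j => (count >>> (k + 1 - 1 - j)) &&& 1 == 1) ∘ Nat.succ) j
        = (fun j => (count >>> (k - 1 - j)) &&& 1 == 1) j := by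
    intro j hj
    simp only [Function.comp_apply]
    have he : k + 1 - 1 - (j + 1) = k - 1 - j := by omega
    rw [Nat.succ_eq_add_one, he]
  rw [List.filter_congr hf]
  apply List.map_congr_left
  intro j hj
  simp only [Function.comp_apply, Nat.succ_eq_add_one]
  push_cast
  ring

theorem pv_decode_hi (index : Int) (k c : Nat) (h : c < 2 ^ k) :
    pvDecode index (k + 1) (2 ^ k + c) = index :: pvDecode (index + 1) k c := by
  unfold pvDecode
  rw [List.range_succ_eq_map]
  rw [List.filter_cons_of_pos (by simp only [Nat.sub_zero, Nat.add_sub_cancel]; simp [pv_bit_top c k h]),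
    List.filter_map, List.map_cons, List.map_map]
  have hf : ∀ j ∈ List.range k,
      ((fun j => ((2 ^ k + c) >>> (k + 1 - 1 - j)) &&& 1 == 1) ∘ Nat.succ) j
        = (fun j => (c >>> (k - 1 - j)) &&& 1 == 1) j := by
    intro j hj
    simp only [Function.comp_apply]
    have he : k + 1 - 1 - (j + 1) = k - 1 - j := by omega
    rw [Nat.succ_eq_add_one, he, pv_bit_low c k (k - 1 - j) (by
      have := List.mem_range.mp hj; omega)]
  rw [List.filter_congr hf]
  congr 1
  · simp
  · apply List.map_congr_left
    intro j hj
    simp only [Function.comp_apply, Nat.succ_eq_add_one]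
    push_cast
    ring


theorem pv_runB_succ (index nThreads : Int) (myList : List Int) (k : Nat) (condition : String) :
    pvRunB index nThreads myList (k + 1) condition
      = pvRunB (index + 1) nThreads (myList ++ [index]) k
          (pvRunB (index + 1) nThreads myList k condition) := by
  have hpow : (2 : Nat) ^ (k + 1) = 2 ^ k + 2 ^ k := by rw [pow_succ]; omega
  have e1 : List.foldl (fun acc count =>
        let full := myList ++ pvDecode index (k + 1) count
        if full.length == 0 then acc else acc ++ pvClause nThreads full) condition (List.range (2 ^ k))
      = pvRunB (index + 1) nThreads myList k condition := by
    unfold pvRunB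
    apply PySem.List.foldl_congr_mem
    intro acc count hc
    simp only [pv_decode_lo index k count (List.mem_range.mp hc)]
  have e2 : ∀ init : String, List.foldl (fun acc count =>
        let full := myList ++ pvDecode index (k + 1) count
        if full.length == 0 then acc else acc ++ pvClause nThreads full) init
        (List.map (fun x => 2 ^ k + x) (List.range (2 ^ k)))
      = pvRunB (index + 1) nThreads (myList ++ [index]) k init := by
    intro init
    rw [List.foldl_map]
    unfold pvRunB
    apply PySem.List.foldl_congr_mem
    intro acc c hc
    simp only [pv_decode_hi index k c (List.mem_range.mp hc)]
    simp
  show List.foldl (fun acc count =>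
        let full := myList ++ pvDecode index (k + 1) count
        if full.length == 0 then acc else acc ++ pvClause nThreads full) condition
        (List.range (2 ^ (k + 1))) = _
  rw [hpow, List.range_add, List.foldl_append, e1, e2]

theorem pv_main (k : Nat) : ∀ (index nThreads : Int) (condition : String) (myList : List Int),
    index + (k : Int) = nThreads →
    pvGoA k index condition nThreads myList = pvRunB index nThreads myList k condition := by
  induction k with
  | zero =>
    intro index nThreads condition myList h
    have hin : index = nThreads := by omega
    have hif : (index == nThreads) = true := by simp [hin]
    have hdec : pvDecode index 0 0 = [] := by simp [pvDecode]
    simp only [pvGoA, hif, if_true, pvRunB, pow_zero, List.range_one, List.foldl_cons,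
      List.foldl_nil, hdec, List.append_nil]
    rw [pv_base_eq]
  | succ f ih =>
    intro index nThreads condition myList h
    have hne : (index == nThreads) = false := by
      simp only [beq_eq_false_iff_ne, ne_eq]
      intro he; rw [he] at h; omega
    simp only [pvGoA, hne, Bool.false_eq_true, if_false]
    rw [ih (index + 1) nThreads condition myList (by push_cast at h ⊢; omega),
      ih (index + 1) nThreads _ (myList ++ [index]) (by push_cast at h ⊢; omega),
      pv_runB_succ]

-- ===== VERDICT (by name: the statement is the Claim_ definition above) =====
theorem RecursiveAddClauses_spec : Claim_equal_RecursiveAddClauses := by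
  intro index condition nThreads myList _ hpre
  unfold Pre_RecursiveAddClauses at hpre
  unfold Spec_RecursiveAddClauses RecursiveAddClauses RecursiveAddClauses_alt
  apply pv_main
  have h0 : (0 : Int) ≤ nThreads - index := by omega
  rw [Int.toNat_of_nonneg h0]
  ring
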